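-- pv_equiv track=rewrite | github.com/ljh415/algorithm | programmers/p_라면공장.py | solution
-- ===== SOURCE A (Python) =====
-- def solution(stock, dates, supplies, k):
--     import heapq
--
--     answer = 0
--     idx = 0
--     q = []
--
--     while stock < k:
--         for i in range(idx, len(dates)):
--             if stock < dates[i]:
--                 break
--             heapq.heappush(q, -supplies[i])
--             # idx = i+1
--         stock -= heapq.heappop(q)
--         answer += 1
--
--     return answer
-- ===== SOURCE B (Python) =====
-- def solution(stock, dates, supplies, k):
--     # Jump algorithm: a moving pointer keeps the running maximum supply of the
--     # admitted list prefix; each constant-max segment is crossed in ONE ceiling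
--     # division instead of one heap-refill per day.
--     n = len(dates)
--     answer = 0
--     p = 0
--     m = 0
--     while stock < k:
--         while p < n and dates[p] <= stock:
--             if supplies[p] > m:
--                 m = supplies[p]
--             p += 1
--         target = k if p == n else min(k, dates[p])
--         t = -((stock - target) // m)
--         answer += t
--         stock += t * m
--     return answer
-- ===== Notes on version B (the rewrite author's own statement) =====
-- stated objective: alternative
-- what changed: B drops the heap and A's per-day refill simulation: a moving pointer with a running prefix-maximum supply plus one ceiling division per constant-maximum segment accounts for all refills of a segment at once.
-- outside the precondition, e.g. on solution(4, [2, 6, 8], [4], 8): A returns 1, B returns 1; on solution(0, [0, 0], [5], 3): A raises IndexError, B raises IndexError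
import Mathlib
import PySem

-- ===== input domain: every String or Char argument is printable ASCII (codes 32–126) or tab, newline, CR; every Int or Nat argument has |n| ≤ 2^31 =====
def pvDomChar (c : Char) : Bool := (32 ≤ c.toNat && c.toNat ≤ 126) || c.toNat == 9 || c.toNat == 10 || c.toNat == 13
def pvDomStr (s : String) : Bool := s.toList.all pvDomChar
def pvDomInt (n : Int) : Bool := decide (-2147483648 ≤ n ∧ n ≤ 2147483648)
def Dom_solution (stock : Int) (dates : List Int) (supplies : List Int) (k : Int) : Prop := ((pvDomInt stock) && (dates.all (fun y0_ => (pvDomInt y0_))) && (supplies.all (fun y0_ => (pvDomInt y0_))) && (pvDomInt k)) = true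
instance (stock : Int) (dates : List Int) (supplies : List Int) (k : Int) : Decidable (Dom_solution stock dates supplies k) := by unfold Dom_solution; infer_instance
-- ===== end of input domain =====

-- B replaces A's heap simulation (one heap refill + pop per day of refilling) by a pointer
-- with a running prefix-maximum supply and a ceiling DIVISION that crosses each
-- constant-maximum segment in one arithmetic step: same return value on Pre_.

-- ===== PORT A =====
-- The heapq heap is modeled as a plain list of Ints: heappush = cons, heappop = remove the
-- minimum element (heapq.heappop returns the smallest element; exact for Int contents;
-- popping an empty heap is Python's IndexError, excluded by Pre_).

-- inner `for i in range(idx, len(dates))` loop (idx is always 0 in A); breaks at the first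
-- i with stock < dates[i]; supplies[i] is PySem.List.pyGetD (out of range = IndexError, excluded by Pre_)
def pushLoopA (stock : Int) (dates supplies : List Int) (i : Nat) (q : List Int) : List Int :=
  if h : i < dates.length then
    if stock < dates[i] then q
    else pushLoopA stock dates supplies (i + 1) (-(PySem.List.pyGetD supplies (i : Int) 0) :: q)
  else q
termination_by dates.length - i

def heapPopA (q : List Int) : Int × List Int :=
  match PySem.List.min? q (fun x => x) with
  | some m => (m, q.erase m)
  | none => (0, q)   -- empty heap: Python raises IndexError here (excluded by Pre_)

-- the `while stock < k` loop; fuel: on Pre_ inputs every round raises stock by ≥ 1,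
-- so (k - stock).toNat + 1 units of fuel are never exhausted
def loopA (dates supplies : List Int) (k : Int) : Nat → Int → List Int → Int → Int
  | 0, _, _, answer => answer
  | fuel + 1, stock, q, answer =>
    if stock < k then
      let q' := pushLoopA stock dates supplies 0 q
      let pr := heapPopA q'
      loopA dates supplies k fuel (stock - pr.1) pr.2 (answer + 1)
    else answer

def solution (stock : Int) (dates : List Int) (supplies : List Int) (k : Int) : Int :=
  loopA dates supplies k ((k - stock).toNat + 1) stock [] 0

-- ===== PORT B =====
-- inner `while p < n and dates[p] <= stock` loop of Source B: advance p, keep running max m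
def advanceB (stock : Int) (dates supplies : List Int) (p : Nat) (m : Int) : Nat × Int :=
  if h : p < dates.length then
    if dates[p] ≤ stock then
      advanceB stock dates supplies (p + 1)
        (if m < PySem.List.pyGetD supplies (p : Int) 0 then PySem.List.pyGetD supplies (p : Int) 0 else m)
    else (p, m)
  else (p, m)
termination_by dates.length - p

-- the `while stock < k` loop of Source B: one ceiling-division jump per constant-max segment
-- (fuel (k - stock).toNat + 1 suffices: each jump raises stock by at least 1 on Pre_ inputs)
def jumpB (dates supplies : List Int) (k : Int) : Nat → Int → Nat → Int → Int → Int
  | 0, _, _, _, answer => answer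
  | fuel + 1, stock, p, m, answer =>
    if stock < k then
      let pm := advanceB stock dates supplies p m
      let target := if pm.1 = dates.length then k else min k (dates.getD pm.1 0)
      let t := -(PySem.Int.floordiv (stock - target) pm.2)
      jumpB dates supplies k fuel (stock + t * pm.2) pm.1 pm.2 (answer + t)
    else answer

def solution_alt (stock : Int) (dates : List Int) (supplies : List Int) (k : Int) : Int :=
  jumpB dates supplies k ((k - stock).toNat + 1) stock 0 0 0

-- ===== PRECONDITION & SPEC =====
-- Pre_ excludes inputs where A's refill loop never returns (it pops an empty heap
-- — IndexError — or no positive supply is available so stock never reaches k) or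
-- indexes supplies past its length (IndexError); the supplies-length guard is slightly
-- conservative and also excludes a few inputs on which A happens to return.
-- (xs.getD j 0 below is the list element itself: every index used is bounded.)
def Pre_solution (stock : Int) (dates : List Int) (supplies : List Int) (k : Int) : Prop :=
  stock < k →
    ((∀ i < dates.length, (∀ j ≤ i, dates.getD j 0 < k) → i < supplies.length) ∧
     ∃ i < dates.length, i < supplies.length ∧ 1 ≤ supplies.getD i 0 ∧
       ∀ j ≤ i, dates.getD j 0 ≤ stock)
instance (stock : Int) (dates : List Int) (supplies : List Int) (k : Int) : Decidable (Pre_solution stock dates supplies k) := by unfold Pre_solution; infer_instance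

def pvWitness_solution : Int × List Int × List Int × Int := (0, [0], [5], 3)

def Spec_solution (stock : Int) (dates : List Int) (supplies : List Int) (k : Int) (out : Int) : Prop := out = solution_alt stock dates supplies k
instance (stock : Int) (dates : List Int) (supplies : List Int) (k : Int) (out : Int) : Decidable (Spec_solution stock dates supplies k out) := by unfold Spec_solution; infer_instance

-- ===== CLAIM (what is proved, stated in full; the proofs are below) =====
def Claim_equal_solution : Prop := ∀ (stock : Int) (dates : List Int) (supplies : List Int) (k : Int), Dom_solution stock dates supplies k → Pre_solution stock dates supplies k → Spec_solution stock dates supplies k (solution stock dates supplies k)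

-- ===== LEMMAS AND PROOFS =====

-- what A's inner for-loop leaves on the heap: exactly the old heap plus one copy of
-- -supplies[j] for every j in [i, e), where e is the break index
lemma pushLoopA_mem (stock : Int) (dates supplies : List Int) (e : Nat)
    (he : e ≤ dates.length)
    (hall : ∀ j, j < e → dates.getD j 0 ≤ stock)
    (hbrk : e = dates.length ∨ stock < dates.getD e 0) :
    ∀ i q, i ≤ e →
      ∀ x, x ∈ pushLoopA stock dates supplies i q ↔
        x ∈ q ∨ ∃ j, i ≤ j ∧ j < e ∧ x = -(supplies.getD j 0) := by
  suffices H : ∀ d i q, dates.length - i = d → i ≤ e →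
      ∀ x, x ∈ pushLoopA stock dates supplies i q ↔
        x ∈ q ∨ ∃ j, i ≤ j ∧ j < e ∧ x = -(supplies.getD j 0) by
    intro i q hi x; exact H _ i q rfl hi x
  intro d
  induction d with
  | zero =>
    intro i q hd hi x
    have hni : dates.length ≤ i := by omega
    rw [pushLoopA]
    rw [dif_neg (by omega)]
    constructor
    · exact Or.inl
    · rintro (hx | ⟨j, hij, hje, -⟩)
      · exact hx
      · omega
  | succ d ih =>
    intro i q hd hi x
    by_cases hin : i < dates.length
    · rw [pushLoopA, dif_pos hin]
      by_cases hbi : stock < dates[i]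
      · rw [if_pos hbi]
        have hei : e ≤ i := by
          by_contra hc
          have := hall i (by omega)
          rw [List.getD_eq_getElem _ _ hin] at this
          omega
        constructor
        · exact Or.inl
        · rintro (hx | ⟨j, hij, hje, -⟩)
          · exact hx
          · omega
      · rw [if_neg hbi]
        have hie : i < e := by
          rcases Nat.lt_or_ge i e with h | h
          · exact h
          · have hie' : i = e := by omega
            rcases hbrk with h1 | h1
            · omega
            · rw [← hie', List.getD_eq_getElem _ _ hin] at h1; omega
        rw [ih (i+1) _ (by omega) (by omega) x]
        simp only [List.mem_cons, PySem.List.pyGetD_natCast]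
        constructor
        · rintro ((hx | hx) | ⟨j, hij, hje, hx⟩)
          · exact Or.inr ⟨i, le_refl _, hie, by rw [hx]⟩
          · exact Or.inl hx
          · exact Or.inr ⟨j, by omega, hje, hx⟩
        · rintro (hx | ⟨j, hij, hje, hx⟩)
          · exact Or.inl (Or.inr hx)
          · rcases Nat.eq_or_lt_of_le hij with h | h
            · exact Or.inl (Or.inl (by rw [hx, ← h]))
            · exact Or.inr ⟨j, by omega, hje, hx⟩
    · rw [pushLoopA, dif_neg hin]
      constructor
      · exact Or.inl
      · rintro (hx | ⟨j, hij, hje, -⟩)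
        · exact hx
        · omega

-- what B's inner while-loop computes: the break index and the running prefix maximum
lemma advanceB_spec (stock : Int) (dates supplies : List Int) :
    ∀ p m, p ≤ dates.length →
      p ≤ (advanceB stock dates supplies p m).1 ∧
      (advanceB stock dates supplies p m).1 ≤ dates.length ∧
      (∀ j, p ≤ j → j < (advanceB stock dates supplies p m).1 → dates.getD j 0 ≤ stock) ∧
      ((advanceB stock dates supplies p m).1 = dates.length ∨
        stock < dates.getD (advanceB stock dates supplies p m).1 0) ∧
      m ≤ (advanceB stock dates supplies p m).2 ∧
      (∀ j, p ≤ j → j < (advanceB stock dates supplies p m).1 →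
        supplies.getD j 0 ≤ (advanceB stock dates supplies p m).2) ∧
      ((advanceB stock dates supplies p m).2 = m ∨
        ∃ j, p ≤ j ∧ j < (advanceB stock dates supplies p m).1 ∧
          supplies.getD j 0 = (advanceB stock dates supplies p m).2) := by
  suffices H : ∀ d p m, dates.length - p = d → p ≤ dates.length →
      p ≤ (advanceB stock dates supplies p m).1 ∧
      (advanceB stock dates supplies p m).1 ≤ dates.length ∧
      (∀ j, p ≤ j → j < (advanceB stock dates supplies p m).1 → dates.getD j 0 ≤ stock) ∧
      ((advanceB stock dates supplies p m).1 = dates.length ∨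
        stock < dates.getD (advanceB stock dates supplies p m).1 0) ∧
      m ≤ (advanceB stock dates supplies p m).2 ∧
      (∀ j, p ≤ j → j < (advanceB stock dates supplies p m).1 →
        supplies.getD j 0 ≤ (advanceB stock dates supplies p m).2) ∧
      ((advanceB stock dates supplies p m).2 = m ∨
        ∃ j, p ≤ j ∧ j < (advanceB stock dates supplies p m).1 ∧
          supplies.getD j 0 = (advanceB stock dates supplies p m).2) by
    intro p m hp; exact H _ p m rfl hp
  intro d
  induction d with
  | zero =>
    intro p m hd hp
    have hnp : dates.length ≤ p := by omega
    rw [advanceB, dif_neg (by omega)]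
    refine ⟨le_refl _, by omega, by omega, Or.inl (by omega), le_refl _, by omega, Or.inl rfl⟩
  | succ d ih =>
    intro p m hd hp
    by_cases hin : p < dates.length
    · rw [advanceB, dif_pos hin]
      by_cases hds : dates[p] ≤ stock
      · rw [if_pos hds]
        set m' := if m < PySem.List.pyGetD supplies (p : Int) 0 then PySem.List.pyGetD supplies (p : Int) 0 else m with hm'
        obtain ⟨h1, h2, h3, h4, h5, h6, h7⟩ := ih (p+1) m' (by omega) (by omega)
        have hsp : supplies.getD p 0 ≤ m' := by
          rw [hm']; simp only [PySem.List.pyGetD_natCast]; split <;> omega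
        have hmm' : m ≤ m' := by rw [hm']; split <;> omega
        refine ⟨by omega, h2, ?_, h4, by omega, ?_, ?_⟩
        · intro j hpj hj
          rcases Nat.eq_or_lt_of_le hpj with h | h
          · rw [← h, List.getD_eq_getElem _ _ hin]; exact hds
          · exact h3 j (by omega) hj
        · intro j hpj hj
          rcases Nat.eq_or_lt_of_le hpj with h | h
          · rw [← h]; omega
          · exact h6 j (by omega) hj
        · rcases h7 with h | ⟨j, hj1, hj2, hj3⟩
          · by_cases hc : m < PySem.List.pyGetD supplies (p : Int) 0
            · refine Or.inr ⟨p, le_refl _, by omega, ?_⟩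
              rw [h, hm', if_pos hc]
              simp only [PySem.List.pyGetD_natCast]
            · exact Or.inl (by rw [h, hm', if_neg hc])
          · exact Or.inr ⟨j, by omega, hj2, hj3⟩
      · rw [if_neg hds]
        refine ⟨le_refl _, by omega, by omega, Or.inr ?_, le_refl _, by omega, Or.inl rfl⟩
        rw [List.getD_eq_getElem _ _ hin]; omega
    · rw [advanceB, dif_neg hin]
      refine ⟨le_refl _, by omega, by omega, Or.inl (by omega), le_refl _, by omega, Or.inl rfl⟩

-- one constant-max segment: while the break index stays p' and the prefix max stays m,
-- t consecutive iterations of A's while-loop each pop exactly -m, so they collapse to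
-- 'stock + t*m, answer + t' with some heap q' still bounded below by -m
lemma loopA_steps (dates supplies : List Int) (k : Int) (p' : Nat) (m target : Int)
    (hp' : p' ≤ dates.length)
    (hm1 : 0 ≤ m)
    (hmax : ∀ j, j < p' → supplies.getD j 0 ≤ m)
    (hatt : ∃ j, j < p' ∧ supplies.getD j 0 = m)
    (hbrk : p' = dates.length ∨ target ≤ dates.getD p' 0)
    (htk : target ≤ k) :
    ∀ t : Nat, ∀ f1 stock (q : List Int) (answer : Int),
      t ≤ f1 →
      (∀ j, j < p' → dates.getD j 0 ≤ stock) →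
      (∀ x ∈ q, -m ≤ x) →
      (∀ s : Nat, s < t → stock + (s : Int) * m < target) →
      ∃ q', loopA dates supplies k f1 stock q answer
              = loopA dates supplies k (f1 - t) (stock + (t : Int) * m) q' (answer + (t : Int)) ∧
            ∀ x ∈ q', -m ≤ x := by
  intro t
  induction t with
  | zero =>
    intro f1 stock q answer _ _ hq _
    exact ⟨q, by simp, hq⟩
  | succ t ih =>
    intro f1 stock q answer hf hd hq hint
    obtain ⟨g, rfl⟩ : ∃ g, f1 = g + 1 := ⟨f1 - 1, by omega⟩
    have hst : stock < target := by have := hint 0 (by omega); simpa using this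
    have hsk : stock < k := lt_of_lt_of_le hst htk
    have hbrk' : p' = dates.length ∨ stock < dates.getD p' 0 := by
      rcases hbrk with h | h
      · exact Or.inl h
      · exact Or.inr (lt_of_lt_of_le hst h)
    have hmem := pushLoopA_mem stock dates supplies p' hp' hd hbrk' 0 q (Nat.zero_le _)
    rw [loopA, if_pos hsk]
    set q'' := pushLoopA stock dates supplies 0 q with hq''
    obtain ⟨j₀, hj₀, hj₀m⟩ := hatt
    have hmemr : -m ∈ q'' := by
      rw [hmem (-m)]
      exact Or.inr ⟨j₀, Nat.zero_le _, hj₀, by rw [hj₀m]⟩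
    have hbound : ∀ x ∈ q'', -m ≤ x := by
      intro x hx
      rw [hmem x] at hx
      rcases hx with hx | ⟨j, -, hj, hx⟩
      · exact hq x hx
      · have := hmax j hj; omega
    have hpop : heapPopA q'' = (-m, q''.erase (-m)) := by
      cases hmin : PySem.List.min? q'' (fun x => x) with
      | none =>
        rw [PySem.List.min?_eq_none_iff] at hmin
        rw [hmin] at hmemr; cases hmemr
      | some m₀ =>
        have h1 : m₀ ≤ -m := PySem.List.min?_isMin hmin (-m) hmemr
        have h2 : -m ≤ m₀ := hbound m₀ (PySem.List.min?_mem hmin)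
        have : m₀ = -m := le_antisymm h1 h2
        rw [heapPopA, hmin, this]
    simp only [hpop]
    have hstep : stock - -m = stock + m := by ring
    rw [hstep]
    obtain ⟨q', heq, hq'⟩ := ih g (stock + m) (q''.erase (-m)) (answer + 1) (by omega)
      (fun j hj => by have := hd j hj; omega)
      (fun x hx => hbound x (List.mem_of_mem_erase hx))
      (fun s hs => by have := hint (s + 1) (by omega); push_cast at this ⊢; linarith)
    refine ⟨q', ?_, hq'⟩
    rw [heq]
    have h1 : g + 1 - (t + 1) = g - t := by omega
    have h2 : stock + m + (t : Int) * m = stock + ((t : Nat) + 1 : Int) * m := by ring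
    have h3 : answer + 1 + (t : Int) = answer + ((t : Nat) + 1 : Int) := by ring
    rw [h1, h2, h3]
    norm_num

-- main equivalence: A's day-by-day heap loop equals B's segment-jump loop
lemma jump_eq (dates supplies : List Int) (k : Int) :
    ∀ f2 f1 stock (p : Nat) (m : Int) (q : List Int) (answer : Int),
      p ≤ dates.length →
      (∀ j, j < p → dates.getD j 0 ≤ stock) →
      (∀ j, j < p → supplies.getD j 0 ≤ m) →
      (p = 0 → m = 0) →
      (0 < p → ∃ j, j < p ∧ supplies.getD j 0 = m) →
      (∀ x ∈ q, -m ≤ x) →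
      ((∃ i, i < dates.length ∧ 1 ≤ supplies.getD i 0 ∧
          ∀ j, j ≤ i → dates.getD j 0 ≤ stock) ∨ k ≤ stock) →
      (k - stock).toNat < f1 →
      (k - stock).toNat < f2 →
      loopA dates supplies k f1 stock q answer = jumpB dates supplies k f2 stock p m answer := by
  intro f2
  induction f2 with
  | zero => intro f1 stock p m q answer _ _ _ _ _ _ _ _ hf2; omega
  | succ f2 ih =>
    intro f1 stock p m q answer hp hd hm hm0 hatt hq hw hf1 hf2
    by_cases hsk : stock < k
    · -- the witness index
      have hw' : ∃ i, i < dates.length ∧ 1 ≤ supplies.getD i 0 ∧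
          ∀ j, j ≤ i → dates.getD j 0 ≤ stock := by
        rcases hw with h | h
        · exact h
        · omega
      obtain ⟨i, hiN, hi1, hiall⟩ := hw'
      obtain ⟨r, hr⟩ : ∃ r, r = advanceB stock dates supplies p m := ⟨_, rfl⟩
      have aspec := advanceB_spec stock dates supplies p m hp
      rw [← hr] at aspec
      obtain ⟨a1, a2, a3, a4, a5, a6, a7⟩ := aspec
      have hir : i < r.1 := by
        by_contra hc
        have hc' : r.1 ≤ i := by omega
        rcases a4 with h | h
        · omega
        · have := hiall r.1 hc'; omega
      have hsup : ∀ j, j < r.1 → supplies.getD j 0 ≤ r.2 := by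
        intro j hj
        rcases Nat.lt_or_ge j p with h | h
        · exact le_trans (hm j h) a5
        · exact a6 j h hj
      have hr1 : 1 ≤ r.2 := le_trans hi1 (hsup i hir)
      have hdall : ∀ j, j < r.1 → dates.getD j 0 ≤ stock := by
        intro j hj
        rcases Nat.lt_or_ge j p with h | h
        · exact hd j h
        · exact a3 j h hj
      have hattr : ∃ j, j < r.1 ∧ supplies.getD j 0 = r.2 := by
        rcases a7 with h | ⟨j, hj1, hj2, hj3⟩
        · have hp0 : 0 < p := by
            by_contra hc
            have : m = 0 := hm0 (by omega)
            omega
          obtain ⟨j, hj, hjm⟩ := hatt hp0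
          exact ⟨j, by omega, by omega⟩
        · exact ⟨j, hj2, hj3⟩
      -- the jump target and the ceiling-division step count
      obtain ⟨target, htgt⟩ : ∃ t, t = (if r.1 = dates.length then k else min k (dates.getD r.1 0)) := ⟨_, rfl⟩
      have hst : stock < target := by
        rw [htgt]
        split
        · exact hsk
        · rename_i hne
          have hlt : stock < dates.getD r.1 0 := by
            rcases a4 with h | h
            · exact absurd h hne
            · exact h
          exact lt_min hsk hlt
      have htk : target ≤ k := by
        rw [htgt]; split
        · exact le_refl _
        · exact min_le_left _ _
      have hbrkT : r.1 = dates.length ∨ target ≤ dates.getD r.1 0 := by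
        rw [htgt]; split
        · exact Or.inl ‹_›
        · exact Or.inr (min_le_right _ _)
      obtain ⟨tZ, htZ⟩ : ∃ t, t = -(PySem.Int.floordiv (stock - target) r.2) := ⟨_, rfl⟩
      have hceil : (tZ - 1) * r.2 < target - stock ∧ target - stock ≤ tZ * r.2 := by
        have heq : -(PySem.Int.floordiv (-(target - stock)) r.2) = tZ := by
          rw [htZ, neg_sub]
        exact (PySem.Int.neg_floordiv_neg_eq_iff_of_pos (by omega)).mp heq
      obtain ⟨hc1, hc2⟩ := hceil
      have htpos : 1 ≤ tZ := by nlinarith [hc1, hc2, hr1, hst]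
      have htle : tZ ≤ target - stock := by nlinarith [hc1, hr1, htpos]
      have htN : ((tZ.toNat : Int)) = tZ := Int.toNat_of_nonneg (by omega)
      rw [jumpB, if_pos hsk]
      simp only [← hr, ← htgt, ← htZ]
      clear htgt htZ
      have K1 : ∀ (t tg st kk : Int) (f : Nat), 1 ≤ t → t ≤ tg - st → tg ≤ kk →
          (kk - st).toNat < f → t.toNat ≤ f := by intro t tg st kk f h1 h2 h3 h4; omega
      have harg1 : tZ.toNat ≤ f1 := K1 tZ target stock k f1 htpos htle htk hf1
      have hsteps := loopA_steps dates supplies k r.1 r.2 target a2 (by omega) hsup hattr hbrkT htk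
        tZ.toNat f1 stock q answer harg1 hdall
        (fun x hx => by have := hq x hx; omega)
        (by
          intro s hs
          have hsle : (s : Int) ≤ tZ - 1 := by omega
          have := mul_le_mul_of_nonneg_right hsle (by omega : (0:Int) ≤ r.2)
          linarith)
      obtain ⟨q', heq, hq'⟩ := hsteps
      rw [heq, htN]
      have hmul1 : tZ ≤ tZ * r.2 := by nlinarith [htpos, hr1]
      have K2 : ∀ (t X tg st kk : Int) (f : Nat), 1 ≤ t → t ≤ X → t ≤ tg - st → tg - st ≤ X →
          st < tg → tg ≤ kk → (kk - st).toNat < f → (kk - (st + X)).toNat < f - t.toNat := by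
        intro t X tg st kk f h1 h2 h2' h3 h4 h5 h6; omega
      have K3 : ∀ (X tg st kk : Int) (f : Nat), tg - st ≤ X → st < tg → st < kk →
          (kk - st).toNat < f + 1 → (kk - (st + X)).toNat < f := by
        intro X tg st kk f h1 h2 h2' h3; omega
      have hfuel1 : (k - (stock + tZ * r.2)).toNat < f1 - tZ.toNat :=
        K2 tZ (tZ * r.2) target stock k f1 htpos hmul1 htle hc2 hst htk hf1
      have hfuel2 : (k - (stock + tZ * r.2)).toNat < f2 :=
        K3 (tZ * r.2) target stock k f2 hc2 hst hsk hf2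
      have hp0' : r.1 = 0 → r.2 = 0 := fun h => absurd (h ▸ hir) (Nat.not_lt_zero i)
      exact ih (f1 - tZ.toNat) (stock + tZ * r.2) r.1 r.2 q' (answer + tZ) a2
        (fun j hj => by have := hdall j hj; nlinarith [htpos, hr1])
        hsup hp0' (fun _ => hattr) hq'
        (Or.inl ⟨i, hiN, hi1, fun j hj => by
          have := hiall j hj; nlinarith [htpos, hr1]⟩)
        hfuel1 hfuel2
    · obtain ⟨g, rfl⟩ : ∃ g, f1 = g + 1 := ⟨f1 - 1, by omega⟩
      rw [loopA, if_neg hsk, jumpB, if_neg hsk]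

-- ===== VERDICT (by name: the statement is the Claim_ definition above) =====
theorem solution_spec : Claim_equal_solution := by
  intro stock dates supplies k _dom hpre
  unfold Spec_solution solution solution_alt
  apply jump_eq
  · exact Nat.zero_le _
  · intro j hj; omega
  · intro j hj; omega
  · intro _; rfl
  · intro h; omega
  · intro x hx; cases hx
  · by_cases hlt : stock < k
    · obtain ⟨-, i, hi, hisup, h1, hall⟩ := hpre hlt
      exact Or.inl ⟨i, hi, by simpa using h1, fun j hj => by simpa using hall j hj⟩
    · exact Or.inr (by omega)
  · omega
  · omega
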